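-- pv_equiv track=rewrite | github.com/sadelaifo/anti-rev | tools/missing_syms.py | find_cycle_path
-- ===== SOURCE A (Python) =====
-- from collections import defaultdict, deque
--
-- def find_cycle_path(edges, scc):
--     # type: (dict[str, list[str]], list[str]) -> list[str]
--     """Find one concrete cycle through *scc* for display."""
--     scc_set = set(scc)
--     start = scc[0]
--     visited = set()  # type: set[str]
--     queue = deque([(start, [start])])
--     while queue:
--         node, path = queue.popleft()
--         for child in edges.get(node, []):
--             if child not in scc_set:
--                 continue
--             if child == start and len(path) > 1:
--                 return path + [start]
--             if child not in visited:
--                 visited.add(child)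
--                 queue.append((child, path + [child]))
--     return scc + [scc[0]]
-- ===== SOURCE B (Python) =====
-- def find_cycle_path(edges, scc):
--     # type: (dict[str, list[str]], list[str]) -> list[str]
--     """Find one concrete cycle through *scc* for display.
--
--     Level-synchronous BFS: the frontier is processed a whole level at a time,
--     each discovered node stores its parent once, and the path is rebuilt from
--     parent pointers only when the closing edge back to *start* is found.
--     """
--     scc_set = set(scc)
--     start = scc[0]
--     parent = {}  # type: dict[str, str]
--     level = [start]
--     depth = 0
--     while level:
--         nxt = []
--         for node in level:
--             kids = [c for c in edges.get(node, []) if c in scc_set]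
--             if depth > 0 and start in kids:
--                 path = [node]
--                 for _ in range(depth):
--                     path.append(parent[path[-1]])
--                 path.reverse()
--                 return path + [start]
--             for c in kids:
--                 if c not in parent:
--                     parent[c] = node
--                     nxt.append(c)
--         level = nxt
--         depth += 1
--     return scc + [scc[0]]
-- ===== Notes on version B (the rewrite author's own statement) =====
-- stated objective: alternative
-- what changed: Replaces A's deque BFS that copies the whole path into every queue entry by a level-synchronous BFS over whole frontier lists with one parent pointer stored per node, rebuilding the path from parent pointers only when the closing edge to start is found.
import Mathlib
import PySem

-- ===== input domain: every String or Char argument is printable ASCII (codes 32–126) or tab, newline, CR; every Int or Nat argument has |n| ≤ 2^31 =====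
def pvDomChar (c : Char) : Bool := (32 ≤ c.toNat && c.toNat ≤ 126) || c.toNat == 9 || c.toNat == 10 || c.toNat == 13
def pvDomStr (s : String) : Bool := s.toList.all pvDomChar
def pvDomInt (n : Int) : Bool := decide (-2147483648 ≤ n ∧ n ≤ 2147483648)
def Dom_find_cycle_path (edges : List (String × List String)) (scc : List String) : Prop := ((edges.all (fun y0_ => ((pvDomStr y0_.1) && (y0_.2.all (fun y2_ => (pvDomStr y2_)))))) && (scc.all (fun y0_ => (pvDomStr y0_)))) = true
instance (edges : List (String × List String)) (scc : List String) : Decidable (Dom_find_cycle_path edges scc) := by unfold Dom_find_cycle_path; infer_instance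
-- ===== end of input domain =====

-- B replaces A's deque BFS carrying a full path copy in every queue entry by a
-- level-synchronous BFS over whole frontier lists with one parent pointer per node,
-- rebuilding the path only when the closing edge is found (objective: alternative algorithm).

-- ===== PORT A =====
-- inner 'for child in edges.get(node, [])' loop of A; returns (early return value?, visited, queue)
def fcpA_inner (sccSet : PySem.Set String) (start : String) (path : List String) :
    List String → PySem.Set String → List (String × List String) →
    Option (List String) × PySem.Set String × List (String × List String)
  | [], visited, queue => (none, visited, queue)
  | c :: rest, visited, queue =>
    if c ∉ sccSet then fcpA_inner sccSet start path rest visited queue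
    else if c = start ∧ 1 < path.length then (some (path ++ [start]), visited, queue)
    else if c ∉ visited then
      fcpA_inner sccSet start path rest (PySem.Set.add visited c) (queue ++ [(c, path ++ [c])])
    else fcpA_inner sccSet start path rest visited queue

-- 'while queue:' loop of A; fuel = scc.length + 1 bounds the number of pops (1 initial entry
-- plus at most one enqueue per distinct element of scc), so the fuel never runs out in fact.
def fcpA_loop (ed : PySem.Dict String (List String)) (sccSet : PySem.Set String) (start : String) :
    Nat → PySem.Set String → List (String × List String) → Option (List String)
  | 0, _, _ => none
  | _ + 1, _, [] => none
  | fuel + 1, visited, (node, path) :: rest =>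
    match fcpA_inner sccSet start path (ed.getD node []) visited rest with
    | (some r, _, _) => some r
    | (none, v', q') => fcpA_loop ed sccSet start fuel v' q'

def find_cycle_path (edges : List (String × List String)) (scc : List String) : List String :=
  match scc with
  | [] => []  -- Python raises IndexError on scc[0]; excluded by Pre_
  | start :: _ =>
    match fcpA_loop (PySem.Dict.ofList edges) (PySem.Set.ofList scc) start
        (scc.length + 1) PySem.Set.empty [(start, [start])] with
    | some p => p
    | none => scc ++ [start]

-- ===== PORT B =====
-- 'path = [node]; for _ in range(depth): path.append(parent[path[-1]])'
-- (parent[path[-1]] is always present when reached — BFS discovery invariant — ported as getD)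
def fcpB_rebuild (parent : PySem.Dict String String) : List String → Nat → List String
  | path, 0 => path
  | path, d + 1 => fcpB_rebuild parent (path ++ [parent.getD (path.getLastD "") ""]) d

-- 'for c in kids: if c not in parent: parent[c] = node; nxt.append(c)'
def fcpB_addkids (node : String) : List String → PySem.Dict String String → List String →
    PySem.Dict String String × List String
  | [], parent, nxt => (parent, nxt)
  | c :: rest, parent, nxt =>
    if parent.contains c then fcpB_addkids node rest parent nxt
    else fcpB_addkids node rest (parent.insert c node) (nxt ++ [c])

-- 'for node in level:' body of B; returns (early return value?, parent, nxt)
def fcpB_level (ed : PySem.Dict String (List String)) (sccSet : PySem.Set String)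
    (start : String) (depth : Nat) :
    List String → PySem.Dict String String → List String →
    Option (List String) × PySem.Dict String String × List String
  | [], parent, nxt => (none, parent, nxt)
  | node :: rest, parent, nxt =>
    let kids := (ed.getD node []).filter (fun c => decide (c ∈ sccSet))
    if 0 < depth ∧ start ∈ kids then
      (some ((fcpB_rebuild parent [node] depth).reverse ++ [start]), parent, nxt)
    else
      let r := fcpB_addkids node kids parent nxt
      fcpB_level ed sccSet start depth rest r.1 r.2

-- 'while level:' loop of B; fuel = scc.length + 2 is spent node by node (one level
-- consumes level.length fuel), which never runs out in fact.
def fcpB_outer (ed : PySem.Dict String (List String)) (sccSet : PySem.Set String)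
    (start : String) :
    Nat → Nat → PySem.Dict String String → List String → Option (List String)
  | 0, _, _, _ => none
  | _ + 1, _, _, [] => none
  | fuel + 1, depth, parent, node :: rest =>
    match fcpB_level ed sccSet start depth (node :: rest) parent [] with
    | (some r, _, _) => some r
    | (none, p', nxt) => fcpB_outer ed sccSet start (fuel - rest.length) (depth + 1) p' nxt
  termination_by f _ _ _ => f
  decreasing_by omega

def find_cycle_path_alt (edges : List (String × List String)) (scc : List String) : List String :=
  match scc with
  | [] => []  -- Python raises IndexError on scc[0]; excluded by Pre_
  | start :: _ =>
    match fcpB_outer (PySem.Dict.ofList edges) (PySem.Set.ofList scc) start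
        (scc.length + 2) 0 PySem.Dict.empty [start] with
    | some p => p
    | none => scc ++ [start]

-- ===== PRECONDITION & SPEC =====
-- Pre_ excludes only scc = [], where both Pythons raise IndexError on scc[0].
def Pre_find_cycle_path (edges : List (String × List String)) (scc : List String) : Prop := scc ≠ []
instance (edges : List (String × List String)) (scc : List String) : Decidable (Pre_find_cycle_path edges scc) := by unfold Pre_find_cycle_path; infer_instance

def pvWitness_find_cycle_path : (List (String × List String)) × List String :=
  ([("a", ["b"]), ("b", ["a"])], ["a", "b"])

def Spec_find_cycle_path (edges : List (String × List String)) (scc : List String) (out : List String) : Prop := out = find_cycle_path_alt edges scc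
instance (edges : List (String × List String)) (scc : List String) (out : List String) : Decidable (Spec_find_cycle_path edges scc out) := by unfold Spec_find_cycle_path; infer_instance

-- ===== CLAIM (what is proved, stated in full; the proofs are below) =====
def Claim_equal_find_cycle_path : Prop := ∀ (edges : List (String × List String)) (scc : List String), Dom_find_cycle_path edges scc → Pre_find_cycle_path edges scc → Spec_find_cycle_path edges scc (find_cycle_path edges scc)

-- ===== LEMMAS AND PROOFS =====

-- the chain of parent pointers from n, d+1 elements: [n, parent n, parent² n, …]
def pvWalk (p : PySem.Dict String String) : String → Nat → List String
  | n, 0 => [n]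
  | n, d + 1 => n :: pvWalk p (p.getD n "") d

-- every hop of the d-step walk from n looks up a key present in p
def pvGood (p : PySem.Dict String String) : String → Nat → Prop
  | _, 0 => True
  | n, d + 1 => p.contains n = true ∧ pvGood p (p.getD n "") d

theorem pvWalk_length (p : PySem.Dict String String) (n : String) (d : Nat) :
    (pvWalk p n d).length = d + 1 := by
  induction d generalizing n with
  | zero => rfl
  | succ d ih => simp [pvWalk, ih]

-- inserting a FRESH key never disturbs a grounded walk
theorem pvWalk_insert_fresh (p : PySem.Dict String String) (k v : String)
    (hk : p.contains k = false) (n : String) (d : Nat) (hg : pvGood p n d) :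
    pvWalk (p.insert k v) n d = pvWalk p n d ∧ pvGood (p.insert k v) n d := by
  induction d generalizing n with
  | zero => exact ⟨rfl, trivial⟩
  | succ d ih =>
    obtain ⟨hc, hg'⟩ := hg
    have hne : n ≠ k := by intro h; rw [h] at hc; rw [hk] at hc; exact Bool.false_ne_true hc
    have hget : (p.insert k v).getD n "" = p.getD n "" := PySem.Dict.getD_insert_of_ne p v "" hne
    obtain ⟨hw, hgood⟩ := ih _ hg'
    refine ⟨?_, ?_⟩
    · simp [pvWalk, hget, hw]
    · refine ⟨?_, ?_⟩
      · rw [PySem.Dict.contains_insert, hc]; simp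
      · rw [hget]; exact hgood

-- A-queue entry ↔ B-frontier node, at depth d, grounded in parent dict p
def pvEnt (p : PySem.Dict String String) (d : Nat) (ea : String × List String) (c : String) : Prop :=
  ea.1 = c ∧ pvGood p c d ∧ ea.2 = (pvWalk p c d).reverse

-- A's visited set = key set of B's parent dict
def pvVisR (visited : PySem.Set String) (p : PySem.Dict String String) : Prop :=
  ∀ s, s ∈ visited ↔ p.contains s = true

-- number of scc entries not yet discovered (fuel potential)
def pvCap (sccL : List String) (p : PySem.Dict String String) : Nat :=
  (sccL.filter (fun s => !p.contains s)).length

theorem pvEnt_insert_fresh (p : PySem.Dict String String) (k v : String)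
    (hk : p.contains k = false) (d' : Nat) (ea : String × List String) (c : String)
    (h : pvEnt p d' ea c) : pvEnt (p.insert k v) d' ea c := by
  obtain ⟨h1, h2, h3⟩ := h
  obtain ⟨hw, hg⟩ := pvWalk_insert_fresh p k v hk c d' h2
  exact ⟨h1, hg, by rw [h3, hw]⟩

theorem pvFilter_mono (L : List String) (q r : String → Bool)
    (h : ∀ s, r s = true → q s = true) : (L.filter r).length ≤ (L.filter q).length := by
  induction L with
  | nil => simp
  | cons a t ih =>
    by_cases hr : r a = true
    · simp [List.filter_cons, hr, h a hr]; omega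
    · have : r a = false := by cases hra : r a; rfl; exact absurd hra hr
      by_cases hq : q a = true
      · simp [List.filter_cons, this, hq]; omega
      · have hqf : q a = false := by cases hqa : q a; rfl; exact absurd hqa hq
        simp [List.filter_cons, this, hqf]; omega

theorem pvCap_insert (sccL : List String) (p : PySem.Dict String String) (k v : String)
    (hk : k ∈ sccL) (hfresh : p.contains k = false) :
    pvCap sccL (p.insert k v) + 1 ≤ pvCap sccL p := by
  induction sccL with
  | nil => cases hk
  | cons a t ih =>
    have hmono : ∀ s, (!(p.insert k v).contains s) = true → (!p.contains s) = true := by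
      intro s hs
      rw [PySem.Dict.contains_insert] at hs
      simp only [Bool.not_eq_true'] at hs ⊢
      exact (Bool.or_eq_false_iff.1 hs).2
    by_cases hak : a = k
    · subst hak
      have h2 : (!p.contains a) = true := by simp [hfresh]
      have hmonolen := pvFilter_mono t _ _ hmono
      unfold pvCap at *
      rw [List.filter_cons, List.filter_cons]
      simp [PySem.Dict.contains_insert_self, h2]
      omega
    · have hkt : k ∈ t := by cases hk; exact absurd rfl hak; assumption
      have hsame : (!(p.insert k v).contains a) = (!p.contains a) := by
        rw [PySem.Dict.contains_insert]
        have : (a == k) = false := by simp [hak]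
        rw [this]; simp
      have hrec := ih hkt
      unfold pvCap at *
      rw [List.filter_cons, List.filter_cons, hsame]
      cases h : (!p.contains a) with
      | false => simpa [h] using hrec
      | true => simp [h]; omega

-- if A's inner scan meets start beyond level 0, it returns path ++ [start]
theorem fcpA_inner_ret (sccSet : PySem.Set String) (start : String) (path : List String)
    (hlen : 1 < path.length) :
    ∀ (children : List String) (visited : PySem.Set String)
      (q : List (String × List String)),
      start ∈ children.filter (fun c => decide (c ∈ sccSet)) →
      ∃ v' q', fcpA_inner sccSet start path children visited q = (some (path ++ [start]), v', q') := by
  intro children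
  induction children with
  | nil => intro _ _ h; simp at h
  | cons c rest ih =>
    intro visited q hmem
    by_cases hc : c ∈ sccSet
    · by_cases hcs : c = start
      · subst hcs
        refine ⟨visited, q, ?_⟩
        simp [fcpA_inner, hc, hlen]
      · have hrest : start ∈ rest.filter (fun c => decide (c ∈ sccSet)) := by
          simp [List.filter_cons, hc] at hmem
          rcases hmem with h | h
          · exact absurd h.symm hcs
          · simpa using h
        have hii : ¬ (c = start ∧ 1 < path.length) := fun h => hcs h.1
        by_cases hv : c ∈ visited
        · simpa [fcpA_inner, hc, hii, hv] using ih _ _ hrest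
        · simpa [fcpA_inner, hc, hii, hv] using ih _ _ hrest
    · have hrest : start ∈ rest.filter (fun c => decide (c ∈ sccSet)) := by
        simpa [List.filter_cons, hc] using hmem
      simpa [fcpA_inner, hc] using ih _ _ hrest

-- otherwise A's inner scan and B's addkids advance in lockstep
theorem fcpA_inner_none (sccSet : PySem.Set String) (sccL : List String)
    (hsub : ∀ s, s ∈ sccSet → s ∈ sccL) (start node : String) (d : Nat) :
    ∀ (children : List String) (path : List String) (visited : PySem.Set String)
      (p : PySem.Dict String String) (q : List (String × List String)) (nxt : List String),
      ¬ (0 < d ∧ start ∈ children.filter (fun c => decide (c ∈ sccSet))) →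
      pvVisR visited p → pvGood p node d → path = (pvWalk p node d).reverse →
      ∃ p₂ v₂ qnew nnew,
        fcpA_inner sccSet start path children visited q = (none, v₂, q ++ qnew) ∧
        fcpB_addkids node (children.filter (fun c => decide (c ∈ sccSet))) p nxt = (p₂, nxt ++ nnew) ∧
        pvVisR v₂ p₂ ∧ List.Forall₂ (pvEnt p₂ (d + 1)) qnew nnew ∧
        (∀ d' ea c, pvEnt p d' ea c → pvEnt p₂ d' ea c) ∧
        nnew.length + pvCap sccL p₂ ≤ pvCap sccL p := by
  intro children
  induction children with
  | nil =>
    intro path visited p q nxt _ hv hg hp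
    exact ⟨p, visited, [], [], by simp [fcpA_inner], by simp [fcpB_addkids],
      hv, List.Forall₂.nil, fun _ _ _ h => h, by simp⟩
  | cons c rest ih =>
    intro path visited p q nxt hnot hv hg hp
    have hlen : path.length = d + 1 := by rw [hp]; simp [pvWalk_length]
    by_cases hc : c ∈ sccSet
    · have hfilter : (c :: rest).filter (fun c => decide (c ∈ sccSet))
          = c :: rest.filter (fun c => decide (c ∈ sccSet)) := by
        simp [List.filter_cons, hc]
      have hnotrest : ¬ (0 < d ∧ start ∈ rest.filter (fun c => decide (c ∈ sccSet))) := by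
        intro ⟨h1, h2⟩; exact hnot ⟨h1, by rw [hfilter]; exact List.mem_cons_of_mem _ h2⟩
      have hii : ¬ (c = start ∧ 1 < path.length) := by
        intro ⟨h1, h2⟩
        apply hnot
        refine ⟨by omega, ?_⟩
        rw [hfilter, ← h1]; exact List.mem_cons_self
      by_cases hvis : c ∈ visited
      · have hcp : p.contains c = true := (hv c).1 hvis
        obtain ⟨p₂, v₂, qnew, nnew, hA, hB, h1, h2, h3, h4⟩ :=
          ih path visited p q nxt hnotrest hv hg hp
        refine ⟨p₂, v₂, qnew, nnew, ?_, ?_, h1, h2, h3, h4⟩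
        · simpa [fcpA_inner, hc, hii, hvis] using hA
        · rw [hfilter]; simpa [fcpB_addkids, hcp] using hB
      · have hcp : p.contains c = false := by
          cases h : p.contains c
          · rfl
          · exact absurd ((hv c).2 h) hvis
        have hfreshW := pvWalk_insert_fresh p c node hcp node d hg
        have hv' : pvVisR (PySem.Set.add visited c) (p.insert c node) := by
          intro s
          rw [PySem.Set.mem_add, PySem.Dict.contains_insert, hv s]
          cases h : (s == c) with
          | true => simp [eq_of_beq h]
          | false =>
            have : s ≠ c := by intro hh; rw [hh] at h; simp at h
            simp [this]
        obtain ⟨p₂, v₂, qnew, nnew, hA, hB, h1, h2, h3, h4⟩ :=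
          ih path (PySem.Set.add visited c) (p.insert c node)
            (q ++ [(c, path ++ [c])]) (nxt ++ [c]) hnotrest hv' hfreshW.2
            (by rw [hp, hfreshW.1])
        have hentc : pvEnt (p.insert c node) (d + 1) (c, path ++ [c]) c := by
          refine ⟨rfl, ⟨PySem.Dict.contains_insert_self p c node, ?_⟩, ?_⟩
          · rw [PySem.Dict.getD_insert_self]; exact hfreshW.2
          · show path ++ [c] = (pvWalk (p.insert c node) c (d + 1)).reverse
            have : pvWalk (p.insert c node) c (d + 1) = c :: pvWalk p node d := by
              simp [pvWalk, PySem.Dict.getD_insert_self, hfreshW.1]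
            rw [this, hp]; simp
        refine ⟨p₂, v₂, (c, path ++ [c]) :: qnew, c :: nnew, ?_, ?_, h1, ?_, ?_, ?_⟩
        · rw [show q ++ (c, path ++ [c]) :: qnew = (q ++ [(c, path ++ [c])]) ++ qnew by simp]
          simpa [fcpA_inner, hc, hii, hvis] using hA
        · rw [hfilter, show nxt ++ c :: nnew = (nxt ++ [c]) ++ nnew by simp]
          simpa [fcpB_addkids, hcp] using hB
        · exact List.Forall₂.cons (h3 _ _ _ hentc) h2
        · exact fun d' ea cc h => h3 d' ea cc (pvEnt_insert_fresh p c node hcp d' ea cc h)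
        · have hcap := pvCap_insert sccL p c node (hsub c hc) hcp
          simp only [List.length_cons]
          omega
    · have hfilter : (c :: rest).filter (fun c => decide (c ∈ sccSet))
          = rest.filter (fun c => decide (c ∈ sccSet)) := by
        simp [List.filter_cons, hc]
      obtain ⟨p₂, v₂, qnew, nnew, hA, hB, h1, h2, h3, h4⟩ :=
        ih path visited p q nxt (by rw [hfilter] at hnot; exact hnot) hv hg hp
      refine ⟨p₂, v₂, qnew, nnew, ?_, ?_, h1, h2, h3, h4⟩
      · simpa [fcpA_inner, hc] using hA
      · rw [hfilter]; exact hB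

-- rebuild from parent pointers = the reversed walk
theorem fcpB_rebuild_eq (p : PySem.Dict String String) :
    ∀ (d : Nat) (n : String) (acc : List String),
      fcpB_rebuild p (acc ++ [n]) d = acc ++ pvWalk p n d := by
  intro d
  induction d with
  | zero => intro n acc; simp [fcpB_rebuild, pvWalk]
  | succ d ih =>
    intro n acc
    have hlast : (acc ++ [n]).getLastD "" = n := by simp
    show fcpB_rebuild p ((acc ++ [n]) ++ [p.getD ((acc ++ [n]).getLastD "") ""]) d
        = acc ++ pvWalk p n (d + 1)
    rw [hlast, show (acc ++ [n]) ++ [p.getD n ""] = acc ++ (n :: ([] ++ [p.getD n ""])) by simp]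
    rw [show acc ++ (n :: ([] ++ [p.getD n ""])) = (acc ++ [n]) ++ [p.getD n ""] by simp]
    rw [ih (p.getD n "") (acc ++ [n])]
    simp [pvWalk]

-- processing one whole frontier level of B = popping the same entries one by one in A
theorem fcp_level_sim (ed : PySem.Dict String (List String)) (sccSet : PySem.Set String)
    (sccL : List String) (hsub : ∀ s, s ∈ sccSet → s ∈ sccL) (start : String) (d : Nat) :
    ∀ (level : List String) (qAl qN : List (String × List String)) (nxt : List String)
      (visited : PySem.Set String) (p : PySem.Dict String String) (fuel : Nat),
      pvVisR visited p → List.Forall₂ (pvEnt p d) qAl level →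
      List.Forall₂ (pvEnt p (d + 1)) qN nxt →
      (∀ r p'' n'', fcpB_level ed sccSet start d level p nxt = (some r, p'', n'') →
        fcpA_loop ed sccSet start (fuel + level.length) visited (qAl ++ qN) = some r) ∧
      (∀ p' nxt', fcpB_level ed sccSet start d level p nxt = (none, p', nxt') →
        ∃ v' qN', pvVisR v' p' ∧ List.Forall₂ (pvEnt p' (d + 1)) qN' nxt' ∧
          nxt'.length + pvCap sccL p' ≤ nxt.length + pvCap sccL p ∧
          fcpA_loop ed sccSet start (fuel + level.length) visited (qAl ++ qN) =
            fcpA_loop ed sccSet start fuel v' qN') := by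
  intro level
  induction level with
  | nil =>
    intro qAl qN nxt visited p fuel hv hf hfn
    cases hf
    constructor
    · intro r p'' n'' h; simp [fcpB_level] at h
    · intro p' nxt' h
      simp only [fcpB_level] at h
      obtain ⟨rfl, rfl⟩ : p = p' ∧ nxt = nxt' := by
        constructor <;> [exact congrArg (·.2.1) h; exact congrArg (·.2.2) h]
      exact ⟨visited, qN, hv, hfn, by omega, by simp⟩
  | cons node rest ih =>
    intro qAl qN nxt visited p fuel hv hf hfn
    cases hf with
    | cons he hf' =>
      rename_i ea qAl'
      obtain ⟨node', path⟩ := ea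
      obtain ⟨h1, hg, hpath⟩ := he
      simp only at h1 hpath
      subst h1
      have hlen : path.length = d + 1 := by rw [hpath]; simp [pvWalk_length]
      by_cases hcond : 0 < d ∧ start ∈ (ed.getD node' []).filter (fun c => decide (c ∈ sccSet))
      · -- B returns here; A's inner scan returns the same path
        have hreb : (fcpB_rebuild p [node'] d).reverse ++ [start] = path ++ [start] := by
          have h0 : fcpB_rebuild p ([] ++ [node']) d = [] ++ pvWalk p node' d :=
            fcpB_rebuild_eq p d node' []
          simp at h0
          rw [h0, hpath]
        constructor
        · intro r p'' n'' h
          simp only [fcpB_level] at h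
          rw [if_pos hcond] at h
          have hr := congrArg Prod.fst h
          simp only at hr
          injection hr with hr
          subst hr
          obtain ⟨v', q', hA⟩ := fcpA_inner_ret sccSet start path (by omega)
            (ed.getD node' []) visited (qAl' ++ qN) hcond.2
          show fcpA_loop ed sccSet start ((fuel + rest.length) + 1) visited
              ((node', path) :: (qAl' ++ qN)) = some ((fcpB_rebuild p [node'] d).reverse ++ [start])
          simp only [fcpA_loop, hA]
          rw [hreb]
        · intro p' nxt' h
          simp only [fcpB_level] at h
          rw [if_pos hcond] at h
          simp at h
      · -- B continues; run the lockstep inner lemma, then the IH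
        obtain ⟨p₂, v₂, qnew, nnew, hA, hB, hv₂, hf₂, hpres, hcap⟩ :=
          fcpA_inner_none sccSet sccL hsub start node' d (ed.getD node' []) path visited p
            (qAl' ++ qN) nxt hcond hv hg hpath
        have hstep : fcpB_level ed sccSet start d (node' :: rest) p nxt
            = fcpB_level ed sccSet start d rest p₂ (nxt ++ nnew) := by
          simp only [fcpB_level]
          rw [if_neg hcond, hB]
        have hAstep : fcpA_loop ed sccSet start ((fuel + rest.length) + 1) visited
            ((node', path) :: (qAl' ++ qN)) =
            fcpA_loop ed sccSet start (fuel + rest.length) v₂ ((qAl' ++ qN) ++ qnew) := by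
          simp only [fcpA_loop, hA]
        have hql : List.Forall₂ (pvEnt p₂ d) qAl' rest :=
          hf'.imp (fun {a b} h => hpres d a b h)
        have hqn : List.Forall₂ (pvEnt p₂ (d + 1)) (qN ++ qnew) (nxt ++ nnew) :=
          List.rel_append (hfn.imp (fun {a b} h => hpres (d + 1) a b h)) hf₂
        obtain ⟨ihret, ihcont⟩ := ih qAl' (qN ++ qnew) (nxt ++ nnew) v₂ p₂ fuel hv₂ hql hqn
        constructor
        · intro r p'' n'' h
          rw [hstep] at h
          have hres := ihret r p'' n'' h
          show fcpA_loop ed sccSet start ((fuel + rest.length) + 1) visited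
              ((node', path) :: (qAl' ++ qN)) = some r
          rw [hAstep, show (qAl' ++ qN) ++ qnew = qAl' ++ (qN ++ qnew) by simp]
          exact hres
        · intro p' nxt' h
          rw [hstep] at h
          obtain ⟨v', qN', hv', hfn', hcap', heq⟩ := ihcont p' nxt' h
          refine ⟨v', qN', hv', hfn', ?_, ?_⟩
          · simp only [List.length_append] at hcap'; omega
          · show fcpA_loop ed sccSet start ((fuel + rest.length) + 1) visited
                ((node', path) :: (qAl' ++ qN)) = _
            rw [hAstep, show (qAl' ++ qN) ++ qnew = qAl' ++ (qN ++ qnew) by simp]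
            exact heq

-- the outer loops agree whenever A's fuel covers the frontier plus undiscovered scc nodes
theorem fcp_outer_sim (ed : PySem.Dict String (List String)) (sccSet : PySem.Set String)
    (sccL : List String) (hsub : ∀ s, s ∈ sccSet → s ∈ sccL) (start : String) :
    ∀ (FA : Nat) (d : Nat) (p : PySem.Dict String String) (visited : PySem.Set String)
      (level : List String) (qAl : List (String × List String)),
      pvVisR visited p → List.Forall₂ (pvEnt p d) qAl level →
      level.length + pvCap sccL p ≤ FA →
      fcpA_loop ed sccSet start FA visited qAl = fcpB_outer ed sccSet start (FA + 1) d p level := by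
  intro FA
  induction FA using Nat.strong_induction_on with
  | _ FA ihFA =>
    intro d p visited level qAl hv hf hcap
    cases hf with
    | nil =>
      cases FA with
      | zero => simp [fcpA_loop, fcpB_outer]
      | succ n => simp [fcpA_loop, fcpB_outer]
    | cons he hf' =>
      rename_i ea node qAl' rest
      have hlen1 : (node :: rest).length = rest.length + 1 := by simp
      obtain ⟨FA', hFAeq⟩ : ∃ FA', FA = FA' + (node :: rest).length :=
        ⟨FA - (node :: rest).length, by omega⟩
      subst hFAeq
      obtain ⟨hret, hcont⟩ := fcp_level_sim ed sccSet sccL hsub start d (node :: rest)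
        (ea :: qAl') [] [] visited p FA' hv (List.Forall₂.cons he hf') List.Forall₂.nil
      rcases hres : fcpB_level ed sccSet start d (node :: rest) p [] with ⟨o, p', nxt'⟩
      cases o with
      | some r =>
        have hA : fcpA_loop ed sccSet start (FA' + (node :: rest).length) visited
            (ea :: qAl') = some r := by
          have := hret r p' nxt' hres
          simpa using this
        have hB : fcpB_outer ed sccSet start (FA' + (node :: rest).length + 1) d p
            (node :: rest) = some r := by
          rw [hlen1, show FA' + (rest.length + 1) + 1 = (FA' + rest.length + 1) + 1 by omega]
          simp only [fcpB_outer, hres]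
        rw [hA, hB]
      | none =>
        obtain ⟨v', qN', hv', hfn', hcap', heq⟩ := hcont p' nxt' hres
        have hB : fcpB_outer ed sccSet start (FA' + (node :: rest).length + 1) d p
            (node :: rest) = fcpB_outer ed sccSet start (FA' + 1) (d + 1) p' nxt' := by
          rw [hlen1, show FA' + (rest.length + 1) + 1 = (FA' + rest.length + 1) + 1 by omega]
          simp only [fcpB_outer, hres]
          rw [show FA' + rest.length + 1 - rest.length = FA' + 1 by omega]
        have hcapnext : nxt'.length + pvCap sccL p' ≤ FA' := by
          simp only [List.length_nil] at hcap'
          simp only [hlen1] at hcap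
          omega
        have hIH := ihFA FA' (by omega) (d + 1) p' v' nxt' qN' hv' hfn' hcapnext
        rw [hB, ← hIH]
        simpa using heq

-- ===== VERDICT (by name: the statement is the Claim_ definition above) =====
theorem find_cycle_path_spec : Claim_equal_find_cycle_path := by
  intro edges scc _ hpre
  cases scc with
  | nil => exact absurd rfl hpre
  | cons start t =>
    show find_cycle_path edges (start :: t) = find_cycle_path_alt edges (start :: t)
    have hcap : pvCap (start :: t) PySem.Dict.empty ≤ (start :: t).length :=
      (List.length_filter_le _ _)
    have h := fcp_outer_sim (PySem.Dict.ofList edges) (PySem.Set.ofList (start :: t))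
      (start :: t) (fun s hs => (PySem.Set.mem_ofList _ s).1 hs) start
      ((start :: t).length + 1) 0 PySem.Dict.empty PySem.Set.empty [start] [(start, [start])]
      (by intro s; simp [PySem.Set.empty, PySem.Dict.contains_empty])
      (List.Forall₂.cons ⟨rfl, trivial, rfl⟩ List.Forall₂.nil)
      (by simp [List.length_cons] at hcap ⊢; omega)
    simp only [find_cycle_path, find_cycle_path_alt]
    rw [h]
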